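-- pv_equiv track=rewrite | github.com/Amit258012/Hashing-- | count_number_of_mountain_subarray.py | count_mountain_subarray
-- ===== SOURCE A (Python) =====
-- def count_mountain_subarray(arr):
--     n = len(arr)
--     suf = [0] * n
--     suf[n - 1] = 1
--
--     for i in range(n - 2, -1, -1):
--         if arr[i] > arr[i + 1]:
--             suf[i] = suf[i + 1] + 1
--         else:
--             suf[i] = 1
--
--     pref = 1
--     res = 0
--
--     for j in range(1, n):
--         if arr[j] > arr[j - 1]:
--             pref += 1
--         else:
--             pref = 1
--
--         res += (pref - 1) * (suf[j] - 1)
--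
--     return res
-- ===== SOURCE B (Python) =====
-- def count_mountain_subarray(arr):
--     res = 0
--     up = 0   # strictly-increasing steps ending at the previous element
--     pk = 0   # up-count at the peak governing the current descent run
--     for i in range(1, len(arr)):
--         if arr[i] > arr[i - 1]:
--             up += 1
--         elif arr[i] < arr[i - 1]:
--             if up > 0:
--                 pk = up
--             up = 0
--             res += pk
--         else:
--             up = 0
--             pk = 0
--     return res
-- ===== Notes on version B (the rewrite author's own statement) =====
-- stated objective: faster
-- what changed: B drops A's O(n) suffix array and second index pass for a single forward pass with O(1) state (up, pk, res) that charges each peak's product lazily, one unit of the ascent length per descent step.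
import Mathlib
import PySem

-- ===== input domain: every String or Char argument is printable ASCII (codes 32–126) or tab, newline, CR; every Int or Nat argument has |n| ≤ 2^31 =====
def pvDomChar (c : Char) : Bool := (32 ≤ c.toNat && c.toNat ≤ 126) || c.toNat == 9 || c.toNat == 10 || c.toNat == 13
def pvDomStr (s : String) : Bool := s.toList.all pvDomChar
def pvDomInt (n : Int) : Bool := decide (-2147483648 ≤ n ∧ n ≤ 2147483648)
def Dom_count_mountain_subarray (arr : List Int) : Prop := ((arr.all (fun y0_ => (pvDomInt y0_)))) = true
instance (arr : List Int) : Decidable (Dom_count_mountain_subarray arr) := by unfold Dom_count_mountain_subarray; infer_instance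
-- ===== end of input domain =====

-- B replaces A's suffix array + second pass by one forward O(1)-state pass that charges
-- each peak's product lazily over its descent steps (objective: alternative; B also
-- returns 0 on [] where A raises IndexError — the empty list is outside Pre_).

-- ===== PORT A =====
-- A's backward loop filling suf (suf[n-1]=1; suf[i] = suf[i+1]+1 if arr[i]>arr[i+1] else 1),
-- as the obvious structural recursion from the back.
def sufListA : List Int → List Int
  | [] => []
  | [_] => [1]
  | x :: y :: t =>
    let s := sufListA (y :: t)
    (if x > y then s.headD 0 + 1 else 1) :: s

-- A's forward loop over j = 1..n-1 with state (pref, res), reading arr[j-1], arr[j], suf[j].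
def loopA (prev : Int) : List Int → List Int → Int → Int → Int
  | x :: r, s :: sr =>
    fun pref res =>
      let pref' := if x > prev then pref + 1 else 1
      loopA x r sr pref' (res + (pref' - 1) * (s - 1))
  | _, _ => fun _ res => res

def count_mountain_subarray (arr : List Int) : Int :=
  match arr with
  | [] => 0   -- Python: suf[n-1] on the empty suf raises IndexError; excluded by Pre_
  | a :: t =>
    let suf := sufListA (a :: t)
    loopA a t suf.tail 1 0

-- ===== PORT B =====
-- B's single forward loop with state (up, pk, res).
def loopB (prev : Int) : List Int → Int → Int → Int → Int
  | x :: r => fun up pk res =>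
      if x > prev then loopB x r (up + 1) pk res
      else if x < prev then
        let pk' := if up > 0 then up else pk
        loopB x r 0 pk' (res + pk')
      else loopB x r 0 0 res
  | [] => fun _ _ res => res

def count_mountain_subarray_alt (arr : List Int) : Int :=
  match arr with
  | [] => 0
  | a :: t => loopB a t 0 0 0

-- ===== PRECONDITION & SPEC =====
-- Pre_ excludes only the empty list, on which Python A raises IndexError (suf[n-1] on an empty suf).
def Pre_count_mountain_subarray (arr : List Int) : Prop := arr ≠ []
instance (arr : List Int) : Decidable (Pre_count_mountain_subarray arr) := by
  unfold Pre_count_mountain_subarray; infer_instance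

def pvWitness_count_mountain_subarray : List Int := [1, 3, 2]

def Spec_count_mountain_subarray (arr : List Int) (out : Int) : Prop :=
  out = count_mountain_subarray_alt arr
instance (arr : List Int) (out : Int) : Decidable (Spec_count_mountain_subarray arr out) := by
  unfold Spec_count_mountain_subarray; infer_instance

-- ===== CLAIM (what is proved, stated in full; the proofs are below) =====
def Claim_equal_count_mountain_subarray : Prop :=
  ∀ (arr : List Int), Dom_count_mountain_subarray arr →
    Pre_count_mountain_subarray arr →
    Spec_count_mountain_subarray arr (count_mountain_subarray arr)

-- ===== LEMMAS AND PROOFS =====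

-- number of strictly decreasing steps starting from prev into l
def dcount (prev : Int) : List Int → Int
  | [] => 0
  | x :: r => if x < prev then 1 + dcount x r else 0

theorem sufListA_cons (r : List Int) : ∀ x : Int,
    sufListA (x :: r) = (1 + dcount x r) :: sufListA r := by
  induction r with
  | nil => intro x; simp [sufListA, dcount]
  | cons y t ih =>
    intro x
    show sufListA (x :: y :: t) = _
    rw [sufListA]
    rw [ih y]
    by_cases h : x > y
    · simp [dcount, h]
      omega
    · simp [dcount, h]

theorem loopA_eq_loopB (rest : List Int) : ∀ (prev up pk res : Int), 0 ≤ up →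
    loopA prev rest (sufListA rest) (up + 1)
      (res + (if up > 0 then up else pk) * dcount prev rest)
      = loopB prev rest up pk res := by
  induction rest with
  | nil => intro prev up pk res _; simp [loopA, loopB, dcount]
  | cons x r ih =>
    intro prev up pk res hup
    by_cases hgt : x > prev
    · have hnlt : ¬ x < prev := by omega
      have hd : dcount prev (x :: r) = 0 := by simp [dcount, hnlt]
      rw [sufListA_cons, hd]; simp only [loopA, loopB]; rw [if_pos hgt, if_pos hgt]
      have h2 : res + (if up > 0 then up else pk) * 0 +
          (up + 1 + 1 - 1) * (1 + dcount x r - 1)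
          = res + (if up + 1 > 0 then up + 1 else pk) * dcount x r := by
        rw [if_pos (show up + 1 > 0 by omega)]; ring
      rw [h2]
      exact ih x (up + 1) pk res (by omega)
    · by_cases hlt : x < prev
      · have hd : dcount prev (x :: r) = 1 + dcount x r := by simp [dcount, hlt]
        rw [sufListA_cons, hd]; simp only [loopA, loopB]; rw [if_neg hgt, if_neg hgt, if_pos hlt]
        set Q : Int := if up > 0 then up else pk with hQ
        have h2 : res + Q * (1 + dcount x r) + (1 - 1) * (1 + dcount x r - 1)
            = (res + Q) + (if (0:Int) > 0 then (0:Int) else Q) * dcount x r := by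
          rw [if_neg (show ¬ (0:Int) > 0 by omega)]; ring
        have h1 : (1 : Int) = 0 + 1 := by ring
        rw [h2, h1]
        exact ih x 0 Q (res + Q) le_rfl
      · have hd : dcount prev (x :: r) = 0 := by simp [dcount, hlt]
        rw [sufListA_cons, hd]; simp only [loopA, loopB]; rw [if_neg hgt, if_neg hgt, if_neg hlt]
        have h2 : res + (if up > 0 then up else pk) * 0 + (1 - 1) * (1 + dcount x r - 1)
            = res + (if (0:Int) > 0 then (0:Int) else 0) * dcount x r := by
          simp
        have h1 : (1 : Int) = 0 + 1 := by ring
        rw [h2, h1]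
        exact ih x 0 0 res le_rfl

-- ===== VERDICT (by name: the statement is the Claim_ definition above) =====
theorem count_mountain_subarray_spec : Claim_equal_count_mountain_subarray := by
  intro arr _hdom hpre
  unfold Spec_count_mountain_subarray
  match arr with
  | [] => exact absurd rfl hpre
  | a :: t =>
    show count_mountain_subarray (a :: t) = count_mountain_subarray_alt (a :: t)
    simp only [count_mountain_subarray, count_mountain_subarray_alt]
    rw [sufListA_cons, List.tail_cons]
    have := loopA_eq_loopB t a 0 0 0 le_rfl
    rw [if_neg (show ¬ (0:Int) > 0 by omega)] at this
    simpa using this
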